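-- pv_equiv track=rewrite | github.com/faisalkindi/CDGuardCancel | tools/decode_gap_bytecode.py | find_fixed_vs_variable
-- ===== SOURCE A (Python) =====
-- def find_fixed_vs_variable(records, period):
--     """Identify fixed and variable bytes across records."""
--     if not records:
--         return [], []
--     fixed = []
--     variable = []
--     for byte_pos in range(min(period, len(records[0]))):
--         values = set()
--         for rec in records:
--             if byte_pos < len(rec):
--                 values.add(rec[byte_pos])
--         if len(values) == 1:
--             fixed.append(byte_pos)
--         else:
--             variable.append(byte_pos)
--     return fixed, variable
-- ===== SOURCE B (Python) =====
-- def find_fixed_vs_variable(records, period):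
--     """Identify fixed and variable bytes across records.
--
--     Single row-major pass: seed values come from records[0]; a position is
--     variable as soon as any later record disagrees with the seed there."""
--     if not records:
--         return [], []
--     seed = records[0]
--     n = min(period, len(seed))
--     if n < 0:
--         n = 0
--     var_flag = [False] * n
--     for rec in records[1:]:
--         for pos in range(min(n, len(rec))):
--             if rec[pos] != seed[pos]:
--                 var_flag[pos] = True
--     fixed = [i for i in range(n) if not var_flag[i]]
--     variable = [i for i in range(n) if var_flag[i]]
--     return fixed, variable
-- ===== Notes on version B (the rewrite author's own statement) =====
-- stated objective: faster
-- what changed: Replaces the per-position set construction (a fresh set built over all records for every byte position) with one row-major pass keeping a boolean var_flag array against the seed record records[0], then reading the two index lists off the flags.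
import Mathlib
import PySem

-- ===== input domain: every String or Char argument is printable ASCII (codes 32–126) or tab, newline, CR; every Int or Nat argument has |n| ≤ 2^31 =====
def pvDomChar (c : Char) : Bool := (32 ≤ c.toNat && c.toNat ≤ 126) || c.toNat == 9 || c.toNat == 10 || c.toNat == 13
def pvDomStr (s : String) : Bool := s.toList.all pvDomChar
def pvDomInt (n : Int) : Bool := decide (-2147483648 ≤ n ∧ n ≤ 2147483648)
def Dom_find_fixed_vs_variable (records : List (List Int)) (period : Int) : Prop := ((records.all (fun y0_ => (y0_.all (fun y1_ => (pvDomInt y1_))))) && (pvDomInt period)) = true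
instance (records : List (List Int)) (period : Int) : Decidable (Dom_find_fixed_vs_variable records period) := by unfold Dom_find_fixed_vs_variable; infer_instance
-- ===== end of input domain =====

-- B replaces A's per-position set construction with one row-major pass keeping a
-- boolean flag array against the seed record — no per-position set allocation (constant-factor speedup, measured).

-- ===== PORT A =====
-- Literal transliteration of A: for each byte position in range(min(period, len(records[0]))),
-- build a set of the values at that position over all (long-enough) records and classify by its size.
def find_fixed_vs_variable (records : List (List Int)) (period : Int) : List Int × List Int :=
  match records with
  | [] => ([], [])
  | r0 :: _ =>
    (PySem.List.pyRange 0 (min period (r0.length : Int)) 1).foldl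
      (fun acc byte_pos =>
        let values : PySem.Set Int := records.foldl
          (fun s rec =>
            if byte_pos < (rec.length : Int) then PySem.Set.add s (PySem.List.pyGetD rec byte_pos 0)
            else s)
          PySem.Set.empty
        if PySem.Set.len values == 1 then (acc.1 ++ [byte_pos], acc.2)
        else (acc.1, acc.2 ++ [byte_pos]))
      ([], [])

-- ===== PORT B =====
-- Transliteration of Source B. Every index Source B uses is nonnegative and in range, so the
-- Nat-indexed List.range / List.getD / List.set are exact for Python's range / rec[pos] /
-- var_flag[pos] = True here; 'n = min(period, len(seed)); if n < 0: n = 0' is Int.toNat of the min.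
def find_fixed_vs_variable_alt (records : List (List Int)) (period : Int) : List Int × List Int :=
  match records with
  | [] => ([], [])
  | seed :: rest =>
    let n : Nat := (min period (seed.length : Int)).toNat
    let flags : List Bool := rest.foldl
      (fun flags rec =>
        (List.range (min n rec.length)).foldl
          (fun fl pos => if rec.getD pos 0 != seed.getD pos 0 then fl.set pos true else fl)
          flags)
      (List.replicate n false)
    (((List.range n).filter (fun i => !(flags.getD i false))).map (fun i => (Int.ofNat i)),
     ((List.range n).filter (fun i => flags.getD i false)).map (fun i => (Int.ofNat i)))

-- ===== PRECONDITION & SPEC =====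
def Spec_find_fixed_vs_variable (records : List (List Int)) (period : Int) (out : List Int × List Int) : Prop := out = find_fixed_vs_variable_alt records period
instance (records : List (List Int)) (period : Int) (out : List Int × List Int) : Decidable (Spec_find_fixed_vs_variable records period out) := by unfold Spec_find_fixed_vs_variable; infer_instance

-- ===== CLAIM (what is proved, stated in full; the proofs are below) =====
def Claim_equal_find_fixed_vs_variable : Prop := ∀ (records : List (List Int)) (period : Int), Dom_find_fixed_vs_variable records period → Spec_find_fixed_vs_variable records period (find_fixed_vs_variable records period)

-- ===== LEMMAS AND PROOFS =====

-- 'is some later record different from the seed at position i (and long enough)?'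
def pvVarAny (seed : List Int) (n : Nat) (rest : List (List Int)) (i : Nat) : Bool :=
  rest.any (fun rec => decide (i < min n rec.length) && (rec.getD i 0 != seed.getD i 0))

-- A's inner set-building loop is set() updated with the values of the long-enough records.
theorem foldl_if_add_eq_update (i : Int) (xs : List (List Int)) (s : PySem.Set Int) :
    xs.foldl
      (fun s rec =>
        if i < (rec.length : Int) then PySem.Set.add s (PySem.List.pyGetD rec i 0) else s) s
      = PySem.Set.update s
          ((xs.filter (fun rec => decide (i < (rec.length : Int)))).map
            (fun rec => PySem.List.pyGetD rec i 0)) := by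
  induction xs generalizing s with
  | nil => rfl
  | cons x xs ih =>
    simp only [List.foldl_cons, List.filter_cons]
    by_cases h : i < (x.length : Int)
    · simp [h, ih, PySem.Set.update]
    · simp [h, ih]

-- A set built from a list headed by a has exactly one element iff the tail is all a.
theorem ofList_length_one_iff {α : Type} [BEq α] [LawfulBEq α] (a : α) (L : List α) :
    (PySem.Set.ofList (a :: L)).length = 1 ↔ ∀ x ∈ L, x = a := by
  constructor
  · intro h x hx
    obtain ⟨b, hb⟩ := List.length_eq_one_iff.mp h
    have ha : a ∈ PySem.Set.ofList (a :: L) := (PySem.Set.mem_ofList _ _).mpr (by simp)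
    have hxm : x ∈ PySem.Set.ofList (a :: L) := (PySem.Set.mem_ofList _ _).mpr (by simp [hx])
    rw [hb] at ha hxm
    simp only [List.mem_singleton] at ha hxm
    rw [hxm, ha]
  · intro h
    have hmem : ∀ x, x ∈ PySem.Set.ofList (a :: L) ↔ x = a := by
      intro x
      rw [PySem.Set.mem_ofList]
      constructor
      · intro hx
        rcases List.mem_cons.mp hx with rfl | hx
        · rfl
        · exact h _ hx
      · rintro rfl; exact List.mem_cons_self
    have hnd := PySem.Set.nodup_ofList (a :: L)
    have hane : a ∈ PySem.Set.ofList (a :: L) := (hmem a).mpr rfl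
    rcases hS : PySem.Set.ofList (a :: L) with _ | ⟨y, ys⟩
    · rw [hS] at hane; exact absurd hane (List.not_mem_nil)
    · have hy : y = a := (hmem y).mp (by rw [hS]; exact List.mem_cons_self)
      rcases ys with _ | ⟨z, zs⟩
      · rfl
      · exfalso
        have hz : z = a := (hmem z).mp (by rw [hS]; simp)
        rw [hS] at hnd
        simp [hy, hz] at hnd

-- B's inner loop keeps the flag list's length.
theorem inner_length (seed rec : List Int) (m : Nat) (flags : List Bool) :
    ((List.range m).foldl
      (fun fl pos => if rec.getD pos 0 != seed.getD pos 0 then fl.set pos true else fl)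
      flags).length = flags.length := by
  induction m generalizing flags with
  | zero => rfl
  | succ m ih =>
    rw [List.range_succ, List.foldl_append]
    simp only [List.foldl_cons, List.foldl_nil]
    split_ifs
    · rw [List.length_set]; exact ih flags
    · exact ih flags
  
-- What B's inner loop (over one record) does to each flag.
theorem inner_getD (seed rec : List Int) (m : Nat) (flags : List Bool)
    (hm : m ≤ flags.length) (i : Nat) :
    ((List.range m).foldl
      (fun fl pos => if rec.getD pos 0 != seed.getD pos 0 then fl.set pos true else fl)
      flags).getD i false
      = (flags.getD i false || (decide (i < m) && (rec.getD i 0 != seed.getD i 0))) := by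
  induction m generalizing flags with
  | zero => simp
  | succ m ih =>
    rw [List.range_succ, List.foldl_append]
    simp only [List.foldl_cons, List.foldl_nil]
    have hF := ih flags (by omega)
    have hFlen := inner_length seed rec m flags
    have hdec : decide (i < m + 1) = (decide (i < m) || decide (i = m)) := by
      by_cases h1 : i < m <;> by_cases h2 : i = m <;> simp [h1, h2] <;> omega
    split_ifs with hb
    · by_cases hi : i = m
      · subst hi
        rw [List.getD_eq_getElem?_getD, List.getElem?_set, if_pos rfl, if_pos (by omega)]
        have hb' : ¬ rec[i]?.getD 0 = seed[i]?.getD 0 := by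
          simpa [List.getD_eq_getElem?_getD] using hb
        simp [hb']
      · rw [List.getD_eq_getElem?_getD, List.getElem?_set, if_neg (fun h => hi h.symm),
            ← List.getD_eq_getElem?_getD, hF, hdec]
        simp [hi]
    · by_cases hi : i = m
      · subst hi
        rw [hF, hdec]
        have hb' : rec[i]?.getD 0 = seed[i]?.getD 0 := by
          simpa [List.getD_eq_getElem?_getD] using hb
        simp [hb']
      · rw [hF, hdec]
        simp [hi]

-- What B's outer loop does to each flag: it ORs in pvVarAny.
theorem outer_getD (seed : List Int) (n : Nat) (rs : List (List Int)) (flags : List Bool)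
    (hlen : flags.length = n) (i : Nat) :
    (rs.foldl
      (fun flags rec =>
        (List.range (min n rec.length)).foldl
          (fun fl pos => if rec.getD pos 0 != seed.getD pos 0 then fl.set pos true else fl)
          flags)
      flags).getD i false
      = (flags.getD i false || pvVarAny seed n rs i) := by
  induction rs generalizing flags with
  | nil => simp [pvVarAny]
  | cons rec rs ih =>
    rw [List.foldl_cons, ih _ (by rw [inner_length, hlen]),
        inner_getD seed rec _ flags (by omega) i]
    simp [pvVarAny, Bool.or_assoc]

-- Per-position agreement: A's 'len(values) == 1' is the negation of B's flag.
theorem pos_classify (seed : List Int) (rest : List (List Int)) (period : Int)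
    (i : Nat) (hi : (i : Int) < min period (seed.length : Int)) :
    (PySem.Set.len
      ((seed :: rest).foldl
        (fun s rec =>
          if (i : Int) < (rec.length : Int) then PySem.Set.add s (PySem.List.pyGetD rec (i : Int) 0)
          else s)
        PySem.Set.empty) == 1)
      = !(pvVarAny seed ((min period (seed.length : Int)).toNat) rest i) := by
  have hin : i < (min period (seed.length : Int)).toNat := by omega
  rw [foldl_if_add_eq_update]
  rw [List.filter_cons_of_pos (by simp; omega), List.map_cons, PySem.List.pyGetD_natCast]
  have hupd : ∀ (l : List Int), PySem.Set.update PySem.Set.empty l = PySem.Set.ofList l :=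
    fun l => rfl
  rw [hupd]
  rw [Bool.eq_iff_iff]
  simp only [PySem.Set.len, beq_iff_eq, Bool.not_eq_true', pvVarAny]
  rw [Nat.cast_eq_one]
  rw [ofList_length_one_iff]
  constructor
  · intro h
    rw [List.any_eq_false]
    intro rec hrec
    by_cases hlt : i < rec.length
    · have : PySem.List.pyGetD rec (i : Int) 0 = seed.getD i 0 := by
        apply h
        exact List.mem_map_of_mem (List.mem_filter.mpr ⟨hrec, by simp; omega⟩)
      rw [PySem.List.pyGetD_natCast] at this
      simp only [List.getD_eq_getElem?_getD] at this
      simp [this]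
    · simp [hlt]
  · intro h x hx
    rw [List.any_eq_false] at h
    obtain ⟨rec, hrecf, rfl⟩ := List.mem_map.mp hx
    have hrec := List.mem_filter.mp hrecf
    have hlt : i < rec.length := by
      have := hrec.2; simp at this; omega
    have hfalse := h rec hrec.1
    rw [PySem.List.pyGetD_natCast]
    by_contra hne
    apply hfalse
    have h1 : i < min (min period (seed.length : Int)).toNat rec.length :=
      Nat.lt_min.mpr ⟨hin, hlt⟩
    rw [decide_eq_true h1, Bool.true_and, bne_iff_ne]
    exact hne

-- A's outer loop is a partition of the range by the classifying predicate.
theorem foldl_partition {α : Type} (p : α → Bool) (l : List α) (f0 v0 : List α) :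
    l.foldl (fun acc x => if p x then (acc.1 ++ [x], acc.2) else (acc.1, acc.2 ++ [x])) (f0, v0)
      = (f0 ++ l.filter p, v0 ++ l.filter (fun x => !p x)) := by
  induction l generalizing f0 v0 with
  | nil => simp
  | cons x xs ih =>
    simp only [List.foldl_cons, List.filter_cons]
    by_cases h : p x
    · simp [h, ih]
    · simp [h, ih]

-- ===== VERDICT (by name: the statement is the Claim_ definition above) =====
theorem find_fixed_vs_variable_spec : Claim_equal_find_fixed_vs_variable := by
  intro records period _dom
  unfold Spec_find_fixed_vs_variable
  match records with
  | [] => rfl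
  | seed :: rest =>
    simp only [find_fixed_vs_variable, find_fixed_vs_variable_alt]
    rw [foldl_partition]
    rw [PySem.List.pyRange_one]
    simp only [List.nil_append, Int.sub_zero, List.filter_map, Function.comp_def, zero_add]
    have key : ∀ k ∈ List.range (min period (seed.length : Int)).toNat,
        ((List.foldl
            (fun s rec =>
              if (k : Int) < (rec.length : Int) then
                PySem.Set.add s (PySem.List.pyGetD rec (k : Int) 0)
              else s)
            PySem.Set.empty (seed :: rest)).len == 1)
          = !((List.foldl
                (fun flags rec =>
                  List.foldl
                    (fun fl pos =>
                      if rec.getD pos 0 != seed.getD pos 0 then fl.set pos true else fl)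
                    flags (List.range (min (min period (seed.length : Int)).toNat rec.length)))
                (List.replicate (min period (seed.length : Int)).toNat false) rest).getD k false) := by
      intro k hk
      simp only [List.mem_range] at hk
      rw [pos_classify seed rest period k (by omega)]
      rw [outer_getD seed _ rest _ (by simp) k]
      simp
    have key2 : ∀ k ∈ List.range (min period (seed.length : Int)).toNat,
        (!((List.foldl
            (fun s rec =>
              if (k : Int) < (rec.length : Int) then
                PySem.Set.add s (PySem.List.pyGetD rec (k : Int) 0)
              else s)
            PySem.Set.empty (seed :: rest)).len == 1))
          = ((List.foldl
                (fun flags rec =>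
                  List.foldl
                    (fun fl pos =>
                      if rec.getD pos 0 != seed.getD pos 0 then fl.set pos true else fl)
                    flags (List.range (min (min period (seed.length : Int)).toNat rec.length)))
                (List.replicate (min period (seed.length : Int)).toNat false) rest).getD k false) :=
      fun k hk => by rw [key k hk, Bool.not_not]
    rw [List.filter_congr (fun k hk => key k hk), List.filter_congr (fun k hk => key2 k hk)]
    rfl
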